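-- pv_equiv track=rewrite | github.com/GlebRadchenko/yul2venom | yul2venom.py | reorder_sidecar_bytecodes
-- ===== SOURCE A (Python) =====
-- def reorder_sidecar_bytecodes(sidecar_bytecodes: list, yul_order: list) -> list:
--     """Reorder generated sidecar blobs to match Yul CREATE order."""
--     if not sidecar_bytecodes or not yul_order:
--         return sidecar_bytecodes
--
--     sidecar_map = {name: bc for name, bc in sidecar_bytecodes}
--     reordered = []
--     for name in yul_order:
--         if name in sidecar_map:
--             reordered.append((name, sidecar_map.pop(name)))
--     reordered.extend(sidecar_map.items())
--     return reordered
-- ===== SOURCE B (Python) =====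
-- def reorder_sidecar_bytecodes(sidecar_bytecodes: list, yul_order: list) -> list:
--     """Reorder generated sidecar blobs to match Yul CREATE order."""
--     if not sidecar_bytecodes or not yul_order:
--         return sidecar_bytecodes
--
--     first_pos = {}
--     for i, name in enumerate(yul_order):
--         if name not in first_pos:
--             first_pos[name] = i
--
--     items = list(dict(sidecar_bytecodes).items())
--     n = len(yul_order)
--     # rank each pair: its first index in yul_order if present, else past-the-end
--     # in dict order; ranks are all distinct, so one sort yields the final order
--     ranked = sorted(enumerate(items), key=lambda t: first_pos.get(t[1][0], n + t[0]))
--     return [pair for _, pair in ranked]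
-- ===== Notes on version B (the rewrite author's own statement) =====
-- stated objective: alternative
-- what changed: A's destructive loop that pops matched names out of a shrinking dict and appends the mutated remainder is replaced by a rank-and-sort scheme: a first-occurrence position table over yul_order assigns every deduplicated pair a distinct integer rank (first yul index if matched, past-the-end dict position otherwise) and one sort by that rank produces the final order.
import Mathlib
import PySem

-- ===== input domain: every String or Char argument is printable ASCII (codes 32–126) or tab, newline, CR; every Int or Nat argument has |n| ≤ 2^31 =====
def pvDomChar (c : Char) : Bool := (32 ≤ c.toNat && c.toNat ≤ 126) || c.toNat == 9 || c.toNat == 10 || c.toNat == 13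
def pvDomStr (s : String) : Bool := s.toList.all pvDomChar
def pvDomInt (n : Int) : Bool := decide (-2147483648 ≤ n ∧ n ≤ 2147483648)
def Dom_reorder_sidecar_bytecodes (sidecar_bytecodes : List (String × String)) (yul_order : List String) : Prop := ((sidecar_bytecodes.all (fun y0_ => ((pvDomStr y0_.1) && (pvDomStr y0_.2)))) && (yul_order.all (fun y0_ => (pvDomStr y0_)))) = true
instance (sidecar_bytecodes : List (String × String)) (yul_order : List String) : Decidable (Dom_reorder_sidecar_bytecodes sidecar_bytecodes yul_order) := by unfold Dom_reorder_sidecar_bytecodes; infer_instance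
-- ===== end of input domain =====

-- B replaces A's destructive pop-from-a-dict loop by rank-and-sort: a first-occurrence position
-- table over yul_order gives each deduplicated pair a distinct integer rank, and one sort by that
-- rank yields the final order ("alternative").


-- ===== PORT A =====
-- the body of A's 'for name in yul_order' loop: pop matched names out of the shrinking map
def pvStepA (s : PySem.Dict String String × List (String × String)) (name : String) :
    PySem.Dict String String × List (String × String) :=
  if s.1.contains name then
    match s.1.pop? name with
    | some (bc, m') => (m', s.2 ++ [(name, bc)])
    | none => s
  else s

def reorder_sidecar_bytecodes (sidecar_bytecodes : List (String × String)) (yul_order : List String) : List (String × String) :=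
  if sidecar_bytecodes = [] ∨ yul_order = [] then sidecar_bytecodes
  else
    let st := yul_order.foldl pvStepA (PySem.Dict.ofList sidecar_bytecodes, [])
    st.2 ++ st.1.items

-- ===== PORT B =====
def reorder_sidecar_bytecodes_alt (sidecar_bytecodes : List (String × String)) (yul_order : List String) : List (String × String) :=
  if sidecar_bytecodes = [] ∨ yul_order = [] then sidecar_bytecodes
  else
    let first_pos := (PySem.List.enumerate yul_order).foldl
      (fun d t => if d.contains t.2 then d else d.insert t.2 t.1) PySem.Dict.empty
    let items := (PySem.Dict.ofList sidecar_bytecodes).items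
    let n : Int := yul_order.length
    let ranked := PySem.List.sorted (PySem.List.enumerate items)
      (fun t => first_pos.getD t.2.1 (n + t.1))
    ranked.map (·.2)

-- ===== PRECONDITION & SPEC =====
def Spec_reorder_sidecar_bytecodes (sidecar_bytecodes : List (String × String)) (yul_order : List String) (out : List (String × String)) : Prop := out = reorder_sidecar_bytecodes_alt sidecar_bytecodes yul_order
instance (sidecar_bytecodes : List (String × String)) (yul_order : List String) (out : List (String × String)) : Decidable (Spec_reorder_sidecar_bytecodes sidecar_bytecodes yul_order out) := by unfold Spec_reorder_sidecar_bytecodes; infer_instance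

-- ===== CLAIM (what is proved, stated in full; the proofs are below) =====
def Claim_equal_reorder_sidecar_bytecodes : Prop := ∀ (sidecar_bytecodes : List (String × String)) (yul_order : List String), Dom_reorder_sidecar_bytecodes sidecar_bytecodes yul_order → Spec_reorder_sidecar_bytecodes sidecar_bytecodes yul_order (reorder_sidecar_bytecodes sidecar_bytecodes yul_order)

-- ===== LEMMAS AND PROOFS =====

theorem pv_find?_key_filter_self (t : List (String × String)) (n : String) :
    List.find? (fun p => p.1 == n) (t.filter (fun p => !(p.1 == n))) = none := by
  rw [List.find?_eq_none]
  intro p hp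
  simpa using (List.mem_filter.mp hp).2

theorem pv_find?_key_filter_ne (t : List (String × String)) (n x : String) (hx : ¬ x = n) :
    List.find? (fun p => p.1 == x) (t.filter (fun p => !(p.1 == n))) =
    List.find? (fun p => p.1 == x) t := by
  induction t with
  | nil => rfl
  | cons p t ih =>
      have hnx : (n == x) = false := by
        simp only [beq_eq_false_iff_ne, ne_eq]
        intro h; exact hx h.symm
      by_cases hp : p.1 = n
      · have hpx : (p.1 == x) = false := by
          simp only [beq_eq_false_iff_ne, ne_eq, hp]
          intro h; exact hx h.symm
        simp [List.filter_cons, List.find?_cons, hp, hpx, hnx, ih]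
      · by_cases hpx : p.1 = x <;>
          simp [List.filter_cons, List.find?_cons, hp, hpx, hx, ih]

-- get? after erase: the erased key reads none, others unchanged
theorem pv_get?_erase (d : PySem.Dict String String) (n x : String) :
    (d.erase n).get? x = if x == n then none else d.get? x := by
  by_cases hx : x = n
  · subst hx
    simp [PySem.Dict.erase, PySem.Dict.get?, pv_find?_key_filter_self]
  · simp [PySem.Dict.erase, PySem.Dict.get?, hx, pv_find?_key_filter_ne d.items n x hx]

-- a filterMap that drops one key = filter that key out, then the plain filterMap
theorem pv_filterMap_if_none {β : Type} (f : String → Option β) (n : String) (l : List String) :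
    l.filterMap (fun x => if x == n then none else f x) =
    (l.filter (fun x => !(x == n))).filterMap f := by
  induction l with
  | nil => rfl
  | cons a t ih =>
      by_cases ha : a = n
      · simpa [List.filterMap_cons, List.filter_cons, ha] using ih
      · cases hfa : f a <;>
          · simp [List.filter_cons, ha, hfa]
            simpa using ih

-- the matched comprehension against an erased map = the comprehension against the full map, key filtered out
theorem pv_filterMap_erase (l : List String) (d : PySem.Dict String String) (n : String) :
    l.filterMap (fun x => ((d.erase n).get? x).map (fun v => (x, v))) =
    (l.filter (fun x => !(x == n))).filterMap (fun x => (d.get? x).map (fun v => (x, v))) := by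
  simp only [pv_get?_erase, apply_ite (Option.map (fun v => (·, v) _)), Option.map_none]
  exact pv_filterMap_if_none _ n l

-- filtering out a key the map sends to none changes nothing
theorem pv_filterMap_filter_of_none {β : Type} (f : String → Option β) (n : String)
    (h : f n = none) (l : List String) :
    (l.filter (fun x => !(x == n))).filterMap f = l.filterMap f := by
  rw [← pv_filterMap_if_none]
  apply List.filterMap_congr
  intro a _
  by_cases ha : a = n
  · simp [ha, h]
  · simp [ha]

-- the loop invariant: A's fold returns (leftover map, accumulated matches) in closed form
theorem pv_loopA (yul_order : List String) :
    ∀ (d : PySem.Dict String String) (acc : List (String × String)),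
    yul_order.foldl pvStepA (d, acc) =
      (PySem.Dict.mk (d.items.filter (fun p => !(yul_order.contains p.1))),
       acc ++ (PySem.Set.ofList yul_order).filterMap
         (fun x => (d.get? x).map (fun v => (x, v)))) := by
  induction yul_order with
  | nil =>
      intro d acc
      simp [PySem.Set.ofList]
  | cons n t ih =>
      intro d acc
      rw [List.foldl_cons]
      have hcont : d.contains n = (d.get? n).isSome := PySem.Dict.contains_eq_isSome_get? d n
      cases hg : d.get? n with
      | none =>
          have hstep : pvStepA (d, acc) n = (d, acc) := by
            simp [pvStepA, hcont, hg]
          rw [hstep, ih d acc]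
          congr 1
          · congr 1
            apply List.filter_congr
            intro p hp
            have hfind : List.find? (fun q => q.1 == n) d.items = none := by
              simp only [PySem.Dict.get?, Option.map_eq_none_iff] at hg
              exact hg
            have hne := List.find?_eq_none.mp hfind p hp
            have hpn : ¬ p.1 = n := by simpa using hne
            simp [List.contains_cons, hpn]
          · rw [PySem.Set.ofList_cons, List.filterMap_cons]
            simp only [hg, Option.map_none]
            rw [show (PySem.Set.ofList t).discard n
                  = (PySem.Set.ofList t).filter (fun x => !(x == n)) from rfl]
            rw [pv_filterMap_filter_of_none _ n (by simp [hg])]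
      | some v =>
          have hstep : pvStepA (d, acc) n = (d.erase n, acc ++ [(n, v)]) := by
            simp [pvStepA, hcont, hg, PySem.Dict.pop?]
          rw [hstep, ih (d.erase n) (acc ++ [(n, v)])]
          congr 1
          · congr 1
            rw [show (d.erase n).items = d.items.filter (fun p => !(p.1 == n)) from rfl]
            rw [List.filter_filter]
            apply List.filter_congr
            intro p _
            simp only [List.contains_cons, Bool.not_or]
            cases h1 : (p.1 == n) <;> cases h2 : t.contains p.1 <;> simp [h1, h2]
          · rw [PySem.Set.ofList_cons, List.filterMap_cons]
            simp only [hg, Option.map_some]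
            rw [show (PySem.Set.ofList t).discard n
                  = (PySem.Set.ofList t).filter (fun x => !(x == n)) from rfl]
            rw [← pv_filterMap_erase]
            simp

-- ===== B-side lemmas =====

theorem pv_fp_get? (yul : List String) : ∀ (s : Int) (d : PySem.Dict String Int) (x : String),
    ((PySem.List.enumerate yul s).foldl
        (fun d t => if d.contains t.2 then d else d.insert t.2 t.1) d).get? x =
      if d.contains x then d.get? x
      else (PySem.List.index? yul x).map (fun j => s + (j : Int)) := by
  induction yul with
  | nil =>
      intro s d x
      cases h : d.contains x <;> simp [PySem.List.enumerate_nil, h]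
      rw [PySem.Dict.contains_eq_isSome_get?] at h
      simpa using h
  | cons y t ih =>
      intro s d x
      rw [PySem.List.enumerate_cons, List.foldl_cons]
      by_cases hy : d.contains y = true
      · rw [if_pos hy]
        rw [ih (s+1) d x]
        by_cases hx : d.contains x = true
        · simp [hx]
        · have hxy : y ≠ x := by
            intro h; rw [h] at hy; exact hx hy
          simp only [hx, if_false]
          rw [PySem.List.index?_cons_of_ne t hxy]
          cases PySem.List.index? t x <;> simp
          push_cast; ring
      · rw [if_neg hy]
        rw [ih (s+1) (d.insert y s) x]
        by_cases hxy : x = y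
        · subst hxy
          have : (d.insert x s).contains x = true := PySem.Dict.contains_insert_self d x s
          simp only [this, if_true, hy, if_false]
          rw [PySem.Dict.get?_insert_self, PySem.List.index?_cons_self]
          simp
        · have hc : (d.insert y s).contains x = d.contains x := by
            rw [PySem.Dict.contains_insert]
            have : (x == y) = false := by simpa using hxy
            simp [this]
          rw [hc, PySem.Dict.get?_insert_of_ne d s hxy]
          by_cases hx : d.contains x = true
          · simp [hx]
          · simp only [hx, if_false]
            rw [PySem.List.index?_cons_of_ne t (fun h => hxy h.symm)]
            cases PySem.List.index? t x <;> simp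
            push_cast; ring

theorem pv_fp_getD (yul : List String) (x : String) (dflt : Int) :
    ((PySem.List.enumerate yul 0).foldl
        (fun d t => if d.contains t.2 then d else d.insert t.2 t.1) PySem.Dict.empty).getD x dflt =
      match PySem.List.index? yul x with
      | some j => (j : Int)
      | none => dflt := by
  rw [PySem.Dict.getD_eq_get?_getD, pv_fp_get?]
  simp only [PySem.Dict.contains_empty, if_false]
  cases PySem.List.index? yul x <;> simp

theorem pv_find?_enum_snd (l : List (String × String)) : ∀ (s : Int) (name : String),
    ((PySem.List.enumerate l s).find? (fun t => t.2.1 == name)).map (·.2) =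
      l.find? (fun p => p.1 == name) := by
  induction l with
  | nil => intro s name; simp [PySem.List.enumerate_nil]
  | cons p t ih =>
      intro s name
      rw [PySem.List.enumerate_cons]
      by_cases hp : p.1 = name
      · simp [hp]
      · rw [List.find?_cons_of_neg (by simpa using hp),
            List.find?_cons_of_neg (by simpa using hp)]
        exact ih (s+1) name

theorem pv_filter_enum_snd {α : Type} (l : List α) : ∀ (s : Int) (q : α → Bool),
    ((PySem.List.enumerate l s).filter (fun t => q t.2)).map (·.2) = l.filter q := by
  induction l with
  | nil => intro s q; simp [PySem.List.enumerate_nil]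
  | cons x t ih =>
      intro s q
      rw [PySem.List.enumerate_cons]
      cases hq : q x <;> simp [List.filter_cons, hq, ih (s+1) q]

theorem pv_find?_map_self (l : List (String × String)) (name : String) :
    (l.find? (fun p => p.1 == name)).map (fun p => (name, p.2)) =
      l.find? (fun p => p.1 == name) := by
  cases h : l.find? (fun p => p.1 == name) with
  | none => rfl
  | some p =>
      have := List.find?_some h
      have hp : p.1 = name := by simpa using this
      simp [← hp]

theorem pv_dedup_index (l : List String) :
    (PySem.List.dedup l).Pairwise
      (fun a b => ∀ ja jb, PySem.List.index? l a = some ja →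
        PySem.List.index? l b = some jb → ja < jb) := by
  induction l with
  | nil => simp [PySem.List.dedup]
  | cons x t ih =>
      rw [show PySem.List.dedup (x :: t) = x :: (PySem.List.dedup t).filter (fun y => !(y == x)) by
        simp only [PySem.List.dedup_eq_ofList]; rw [PySem.Set.ofList_cons]; rfl]
      constructor
      · intro b hb ja jb hja hjb
        have hbx : x ≠ b := by
          have := (List.mem_filter.mp hb).2; simp at this; exact fun h' => this h'.symm
        rw [PySem.List.index?_cons_self] at hja
        rw [PySem.List.index?_cons_of_ne t hbx] at hjb
        cases hjb' : PySem.List.index? t b with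
        | none => rw [hjb'] at hjb; simp at hjb
        | some j =>
            rw [hjb'] at hjb; simp at hjb
            have h0 : ja = 0 := by simpa using hja.symm
            omega
      · have hfil : ((PySem.List.dedup t).filter (fun y => !(y == x))).Pairwise
            (fun a b => ∀ ja jb, PySem.List.index? t a = some ja →
              PySem.List.index? t b = some jb → ja < jb) := ih.filter _
        refine hfil.imp_of_mem ?_
        intro a b ha hb h ja jb hja hjb
        have hax : x ≠ a := by
          have := (List.mem_filter.mp ha).2; simp at this; exact fun h' => this h'.symm
        have hbx : x ≠ b := by
          have := (List.mem_filter.mp hb).2; simp at this; exact fun h' => this h'.symm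
        rw [PySem.List.index?_cons_of_ne t hax] at hja
        rw [PySem.List.index?_cons_of_ne t hbx] at hjb
        cases hja' : PySem.List.index? t a with
        | none => rw [hja'] at hja; simp at hja
        | some j =>
            cases hjb' : PySem.List.index? t b with
            | none => rw [hjb'] at hjb; simp at hjb
            | some j' =>
                rw [hja'] at hja; rw [hjb'] at hjb
                simp at hja hjb
                have := h j j' hja' hjb'
                omega

theorem pv_B_main (sb : List (String × String)) (yul : List String) :
    (PySem.List.sorted (PySem.List.enumerate (PySem.Dict.ofList sb).items)
        (fun t => (((PySem.List.enumerate yul).foldl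
            (fun d t => if d.contains t.2 then d else d.insert t.2 t.1)
            PySem.Dict.empty).getD t.2.1 ((yul.length : Int) + t.1)))).map (·.2) =
      (PySem.Set.ofList yul).filterMap
          (fun x => ((PySem.Dict.ofList sb).get? x).map (fun v => (x, v)))
        ++ (PySem.Dict.ofList sb).items.filter (fun p => !(yul.contains p.1)) := by
  set d := PySem.Dict.ofList sb with hd
  set items := d.items with hitems
  set E := PySem.List.enumerate items with hE
  set k : Int × (String × String) → Int := fun t =>
      (((PySem.List.enumerate yul).foldl
          (fun d t => if d.contains t.2 then d else d.insert t.2 t.1)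
          PySem.Dict.empty).getD t.2.1 ((yul.length : Int) + t.1)) with hk
  set matchedD := (PySem.List.dedup yul).filterMap
      (fun name => E.find? (fun t => t.2.1 == name)) with hmatchedD
  set leftD := E.filter (fun t => !(yul.contains t.2.1)) with hleftD
  -- key facts
  have hkeysNodup : (items.map (·.1)).Nodup := by
    have h := PySem.Dict.nodup_keys_ofList (κ := String) (ν := String) sb
    simpa [PySem.Dict.keys, hd, hitems] using h
  have hEnames : (E.map (fun t => t.2.1)).Nodup := by
    have : E.map (fun t => t.2.1) = (E.map (·.2)).map (·.1) := by
      simp [List.map_map]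
    rw [this, PySem.List.map_snd_enumerate]
    exact hkeysNodup
  have hENodup : E.Nodup := by
    have hlt := PySem.List.pairwise_lt_enumerate (xs := items) (s := 0)
    exact List.Pairwise.imp (fun {p q} h => by intro he; rw [he] at h; omega) hlt
  -- the key of a matched entry is its first index in yul
  have hkMatched : ∀ t ∈ matchedD, ∃ j : Nat,
      PySem.List.index? yul t.2.1 = some j ∧ k t = (j : Int) ∧ j < yul.length := by
    intro t ht
    obtain ⟨name, hname, hfind⟩ := List.mem_filterMap.mp ht
    have hpred := List.find?_some hfind
    have htname : t.2.1 = name := by simpa using hpred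
    have hmem : name ∈ yul := by
      have := (PySem.List.mem_dedup _ _).mp hname; exact this
    have hsome : (PySem.List.index? yul name).isSome := by
      rw [PySem.List.index?_isSome_iff]; exact hmem
    obtain ⟨j, hj⟩ := Option.isSome_iff_exists.mp hsome
    refine ⟨j, by rw [htname]; exact hj, ?_, ?_⟩
    · rw [hk]; simp only [htname]
      rw [pv_fp_getD, hj]
    · obtain ⟨hlt, _, _⟩ := PySem.List.getElem_of_index?_eq_some hj
      exact hlt
  -- the key of a leftover entry is past the end
  have hkLeft : ∀ t ∈ leftD, k t = (yul.length : Int) + t.1 ∧ 0 ≤ t.1 := by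
    intro t ht
    obtain ⟨htE, hflag⟩ := List.mem_filter.mp ht
    have hnmem : t.2.1 ∉ yul := by simpa using hflag
    have hnone : PySem.List.index? yul t.2.1 = none := by
      rw [PySem.List.index?_eq_none_iff]; exact hnmem
    constructor
    · rw [hk]; simp only []; rw [pv_fp_getD, hnone]
    · obtain ⟨kk, hkk, hteq⟩ := (PySem.List.mem_enumerate_iff _ _ _).mp htE
      rw [hteq]; simp
  -- pairwise strict keys on the target
  have pairM : matchedD.Pairwise (fun a b => k a < k b) := by
    rw [hmatchedD]
    apply List.pairwise_filterMap.mpr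
    refine (pv_dedup_index yul).imp_of_mem ?_
    intro a b ha hb hR u hu v hv
    have hut : u ∈ matchedD := by
      rw [hmatchedD]; exact List.mem_filterMap.mpr ⟨a, ha, hu⟩
    have hvt : v ∈ matchedD := by
      rw [hmatchedD]; exact List.mem_filterMap.mpr ⟨b, hb, hv⟩
    obtain ⟨ja, hja, hku, _⟩ := hkMatched u hut
    obtain ⟨jb, hjb, hkv, _⟩ := hkMatched v hvt
    have hua : u.2.1 = a := by simpa using List.find?_some hu
    have hvb : v.2.1 = b := by simpa using List.find?_some hv
    rw [hua] at hja; rw [hvb] at hjb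
    have := hR ja jb hja hjb
    rw [hku, hkv]
    exact_mod_cast this
  have pairL : leftD.Pairwise (fun a b => k a < k b) := by
    have hlt := PySem.List.pairwise_lt_enumerate (xs := items) (s := 0)
    have hfl : leftD.Pairwise (fun p q => p.1 < q.1) := hlt.filter _
    refine hfl.imp_of_mem ?_
    intro a b ha hb hab
    rw [(hkLeft a ha).1, (hkLeft b hb).1]
    omega
  have cross : ∀ a ∈ matchedD, ∀ b ∈ leftD, k a < k b := by
    intro a ha b hb
    obtain ⟨j, _, hka, hjlt⟩ := hkMatched a ha
    obtain ⟨hkb, hb0⟩ := hkLeft b hb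
    rw [hka, hkb]
    have : (j : Int) < (yul.length : Int) := by exact_mod_cast hjlt
    omega
  have hpair : (matchedD ++ leftD).Pairwise (fun a b => k a < k b) :=
    List.pairwise_append.mpr ⟨pairM, pairL, cross⟩
  have hnodupM : matchedD.Nodup :=
    pairM.imp (fun {a b} h => by intro he; rw [he] at h; omega)
  -- membership characterisation of matchedD
  have hmemM : ∀ t, t ∈ matchedD ↔ (t ∈ E ∧ yul.contains t.2.1 = true) := by
    intro t
    constructor
    · intro ht
      obtain ⟨name, hname, hfind⟩ := List.mem_filterMap.mp ht
      have htname : t.2.1 = name := by simpa using List.find?_some hfind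
      refine ⟨List.mem_of_find?_eq_some hfind, ?_⟩
      rw [htname]
      simpa [List.contains_iff_mem] using (PySem.List.mem_dedup _ _).mp hname
    · rintro ⟨htE, hcont⟩
      have hmem : t.2.1 ∈ yul := by simpa [List.contains_iff_mem] using hcont
      have hdmem : t.2.1 ∈ PySem.List.dedup yul := (PySem.List.mem_dedup _ _).mpr hmem
      have hsome : (E.find? (fun u => u.2.1 == t.2.1)).isSome := by
        rw [List.find?_isSome]; exact ⟨t, htE, by simp⟩
      obtain ⟨t', ht'⟩ := Option.isSome_iff_exists.mp hsome
      have ht'E : t' ∈ E := List.mem_of_find?_eq_some ht'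
      have ht'name : t'.2.1 = t.2.1 := by simpa using List.find?_some ht'
      have : t' = t := List.inj_on_of_nodup_map hEnames ht'E htE ht'name
      rw [hmatchedD]
      exact List.mem_filterMap.mpr ⟨t.2.1, hdmem, by rw [← this] at ht' ⊢; exact ht'⟩
  -- permutation
  have hpermM : matchedD.Perm (E.filter (fun t => yul.contains t.2.1)) := by
    rw [List.perm_ext_iff_of_nodup hnodupM (hENodup.filter _)]
    intro t
    rw [hmemM t, List.mem_filter]
  have hperm : (matchedD ++ leftD).Perm E := by
    refine (hpermM.append (List.Perm.refl leftD)).trans ?_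
    exact List.filter_append_perm _ E
  -- sorted = target
  have hsorted : PySem.List.sorted E k = matchedD ++ leftD :=
    PySem.List.sorted_eq_of_perm_of_pairwise_lt E (matchedD ++ leftD) k hperm hpair
  rw [hsorted, List.map_append]
  congr 1
  · rw [hmatchedD, List.map_filterMap]
    rw [show PySem.Set.ofList yul = PySem.List.dedup yul from (PySem.List.dedup_eq_ofList yul).symm]
    apply List.filterMap_congr
    intro name _
    rw [pv_find?_enum_snd items 0 name]
    have hget : d.get? name = (items.find? (fun p => p.1 == name)).map (·.2) := rfl
    rw [hget, Option.map_map]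
    exact (pv_find?_map_self items name).symm
  · exact pv_filter_enum_snd items 0 (fun p => !(yul.contains p.1))

-- ===== VERDICT (by name: the statement is the Claim_ definition above) =====
theorem reorder_sidecar_bytecodes_spec : Claim_equal_reorder_sidecar_bytecodes := by
  intro sb yo _
  unfold Spec_reorder_sidecar_bytecodes reorder_sidecar_bytecodes reorder_sidecar_bytecodes_alt
  by_cases hguard : sb = [] ∨ yo = []
  · simp [hguard]
  · simp only [hguard, if_false]
    rw [pv_loopA]
    rw [pv_B_main]
    simp
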